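-- pv_equiv track=rewrite | github.com/JayJackman/kibitzer | src/bridge/scoring/calculator.py | _undertrick_penalty
-- ===== SOURCE A (Python) =====
-- def _undertrick_penalty(
--     doubled: bool,
--     redoubled: bool,
--     declarer_vulnerable: bool,
--     down: int,
-- ) -> int:
--     """Total penalty points for the defending side."""
--     if not doubled and not redoubled:
--         per_trick = 100 if declarer_vulnerable else 50
--         return per_trick * down
--
--     # Doubled undertrick schedule (per-trick, not cumulative):
--     #   1st:  NV=100, V=200
--     #   2nd:  NV=200, V=300
--     #   3rd:  NV=200, V=300
--     #   4th+: NV=300, V=300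
--     total = 0
--     for i in range(1, down + 1):
--         if i == 1:
--             trick_penalty = 200 if declarer_vulnerable else 100
--         elif i <= 3:
--             trick_penalty = 300 if declarer_vulnerable else 200
--         else:
--             trick_penalty = 300
--         total += trick_penalty
--
--     if redoubled:
--         return total * 2
--     return total
-- ===== SOURCE B (Python) =====
-- def _undertrick_penalty(
--     doubled: bool,
--     redoubled: bool,
--     declarer_vulnerable: bool,
--     down: int,
-- ) -> int:
--     """Total penalty points for the defending side (closed form, no loop)."""
--     if not doubled and not redoubled:
--         return (100 if declarer_vulnerable else 50) * down
--     if down <= 0: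
--         total = 0
--     elif declarer_vulnerable:
--         total = 300 * down - 100
--     else:
--         total = 100 + 200 * min(down - 1, 2) + 300 * max(down - 3, 0)
--     return total * 2 if redoubled else total
-- ===== Notes on version B (the rewrite author's own statement) =====
-- stated objective: simpler
-- what changed: Replaced the per-trick accumulation loop over range(1, down+1) with a direct closed-form arithmetic expression (piecewise in down with min/max clamps).
import Mathlib
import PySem

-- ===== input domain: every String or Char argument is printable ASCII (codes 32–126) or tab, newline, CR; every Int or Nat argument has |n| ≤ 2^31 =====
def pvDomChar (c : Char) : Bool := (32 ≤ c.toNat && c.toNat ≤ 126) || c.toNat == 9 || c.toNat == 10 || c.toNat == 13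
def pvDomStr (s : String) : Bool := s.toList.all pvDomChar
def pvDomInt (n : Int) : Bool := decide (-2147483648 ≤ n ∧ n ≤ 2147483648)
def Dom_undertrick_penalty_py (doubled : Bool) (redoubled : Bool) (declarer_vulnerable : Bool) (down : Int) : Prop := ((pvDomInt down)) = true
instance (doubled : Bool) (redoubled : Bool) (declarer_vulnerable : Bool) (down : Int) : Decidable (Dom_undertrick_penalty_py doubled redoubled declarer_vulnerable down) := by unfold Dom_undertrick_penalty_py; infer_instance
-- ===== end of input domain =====

-- B replaces A's per-trick accumulation loop with a closed-form piecewise arithmetic expression (simpler, O(1)).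

-- ===== PORT A =====
def undertrick_penalty_py (doubled : Bool) (redoubled : Bool) (declarer_vulnerable : Bool) (down : Int) : Int :=
  if !doubled && !redoubled then
    (if declarer_vulnerable then 100 else 50) * down
  else
    let total : Int :=
      (PySem.List.pyRange 1 (down + 1) 1).foldl (fun total i =>
        let trick_penalty : Int :=
          if i = 1 then (if declarer_vulnerable then 200 else 100)
          else if i ≤ 3 then (if declarer_vulnerable then 300 else 200)
          else 300
        total + trick_penalty) 0
    if redoubled then total * 2 else total

-- ===== PORT B =====
def undertrick_penalty_py_alt (doubled : Bool) (redoubled : Bool) (declarer_vulnerable : Bool) (down : Int) : Int :=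
  if !doubled && !redoubled then
    (if declarer_vulnerable then 100 else 50) * down
  else
    let total : Int :=
      if down ≤ 0 then 0
      else if declarer_vulnerable then 300 * down - 100
      else 100 + 200 * min (down - 1) 2 + 300 * max (down - 3) 0
    if redoubled then total * 2 else total

-- ===== PRECONDITION & SPEC =====
def Spec_undertrick_penalty_py (doubled : Bool) (redoubled : Bool) (declarer_vulnerable : Bool) (down : Int) (out : Int) : Prop := out = undertrick_penalty_py_alt doubled redoubled declarer_vulnerable down
instance (doubled : Bool) (redoubled : Bool) (declarer_vulnerable : Bool) (down : Int) (out : Int) : Decidable (Spec_undertrick_penalty_py doubled redoubled declarer_vulnerable down out) := by unfold Spec_undertrick_penalty_py; infer_instance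

-- ===== CLAIM (what is proved, stated in full; the proofs are below) =====
def Claim_equal_undertrick_penalty_py : Prop := ∀ (doubled : Bool) (redoubled : Bool) (declarer_vulnerable : Bool) (down : Int), Dom_undertrick_penalty_py doubled redoubled declarer_vulnerable down → Spec_undertrick_penalty_py doubled redoubled declarer_vulnerable down (undertrick_penalty_py doubled redoubled declarer_vulnerable down)

-- ===== LEMMAS AND PROOFS =====

-- A's loop body as a per-trick function
def pvTrick (v : Bool) (i : Int) : Int :=
  if i = 1 then (if v then 200 else 100)
  else if i ≤ 3 then (if v then 300 else 200)
  else 300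

-- A's accumulated total as a sum
def pvTotal (v : Bool) (down : Int) : Int :=
  ((PySem.List.pyRange 1 (down + 1) 1).map (pvTrick v)).sum

theorem pvTotal_eq_foldl (v : Bool) (down : Int) :
    (PySem.List.pyRange 1 (down + 1) 1).foldl (fun total i => total + pvTrick v i) 0
      = pvTotal v down := by
  rw [pvTotal, List.sum_eq_foldl, List.foldl_map]

theorem pvTotal_succ (v : Bool) (n : Int) (h : 0 ≤ n) :
    pvTotal v (n + 1) = pvTotal v n + pvTrick v (n + 1) := by
  unfold pvTotal
  rw [show n + 1 + 1 = (n + 1) + 1 from rfl,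
      PySem.List.pyRange_one_succ_right (by omega : (1:Int) ≤ n + 1)]
  simp

theorem pvTotal_ge_three (v : Bool) (n : Int) (h : 3 ≤ n) :
    pvTotal v n = pvTotal v 3 + 300 * (n - 3) := by
  induction n, h using Int.le_induction with
  | base => simp
  | succ m hm ih =>
      rw [pvTotal_succ v m (by omega), ih]
      have : pvTrick v (m + 1) = 300 := by
        unfold pvTrick
        rw [if_neg (by omega), if_neg (by omega)]
      rw [this]; ring

theorem pvTotal_closed (v : Bool) (down : Int) :
    pvTotal v down =
      (if down ≤ 0 then 0
       else if v then 300 * down - 100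
       else 100 + 200 * min (down - 1) 2 + 300 * max (down - 3) 0) := by
  by_cases h0 : down ≤ 0
  · rw [if_pos h0]
    unfold pvTotal
    rw [PySem.List.pyRange_one_eq_nil (by omega)]
    simp
  · rw [if_neg h0]
    by_cases h3 : down ≤ 3
    · interval_cases down <;> cases v <;> decide
    · rw [pvTotal_ge_three v down (by omega)]
      have h3v : pvTotal v 3 = if v then 800 else 500 := by cases v <;> decide
      rw [h3v, min_eq_right (by omega : (2:Int) ≤ down - 1),
          max_eq_left (by omega : (0:Int) ≤ down - 3)]
      cases v <;> simp <;> ring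

-- ===== VERDICT (by name: the statement is the Claim_ definition above) =====
theorem undertrick_penalty_py_spec : Claim_equal_undertrick_penalty_py := by
  intro doubled redoubled v down _
  unfold Spec_undertrick_penalty_py undertrick_penalty_py undertrick_penalty_py_alt
  by_cases hd : (!doubled && !redoubled) = true
  · simp [hd]
  · simp only [hd, if_false, Bool.false_eq_true]
    have := pvTotal_closed v down
    rw [show (fun (total i : Int) =>
        let trick_penalty : Int :=
          if i = 1 then (if v then 200 else 100)
          else if i ≤ 3 then (if v then 300 else 200)
          else 300
        total + trick_penalty) = (fun total i => total + pvTrick v i) from rfl,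
      pvTotal_eq_foldl, this]
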